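-- pv_equiv track=rewrite | github.com/dveb8886/ResearchLab | controllers/arithmeticController.py | calc_graph
-- ===== SOURCE A (Python) =====
-- def calc_graph(dataset):
--     redTotal = 0
--     red = []
--     blueTotal = 0
--     blue = []
--     cyanTotal = 0
--     cyan = []
--
--     for i in range (len(dataset[0])):
--         redTotal += dataset[0][i]
--         red.append(redTotal)
--         blueTotal += dataset[1][i]
--         blue.append(blueTotal)
--         cyanTotal += (dataset[0][i] + dataset[1][i])
--         cyan.append(cyanTotal)
--
--     return [red, blue, cyan]
-- ===== SOURCE B (Python) =====
-- def prefix_sums(xs):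
--     # divide-and-conquer scan: prefix(xs) = prefix(L) ++ (sum(L) + each of prefix(R))
--     if len(xs) <= 1:
--         return list(xs)
--     mid = len(xs) // 2
--     left = prefix_sums(xs[:mid])
--     right = prefix_sums(xs[mid:])
--     off = left[-1]
--     return left + [off + v for v in right]
--
-- def calc_graph(dataset):
--     col0 = list(dataset[0])
--     col1 = [dataset[1][i] for i in range(len(col0))]
--     red = prefix_sums(col0)
--     blue = prefix_sums(col1)
--     # linearity of prefix sums: the cyan series is the elementwise sum of the other two
--     cyan = [r + b for r, b in zip(red, blue)]
--     return [red, blue, cyan]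
-- ===== Notes on version B (the rewrite author's own statement) =====
-- stated objective: alternative
-- what changed: Replaces A's single fused accumulator loop by a divide-and-conquer scan (prefix(xs) = prefix(left) ++ offset-shifted prefix(right)) for the two series, and derives the third series by elementwise addition of the first two using linearity of prefix sums instead of a third accumulation.
import Mathlib
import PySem

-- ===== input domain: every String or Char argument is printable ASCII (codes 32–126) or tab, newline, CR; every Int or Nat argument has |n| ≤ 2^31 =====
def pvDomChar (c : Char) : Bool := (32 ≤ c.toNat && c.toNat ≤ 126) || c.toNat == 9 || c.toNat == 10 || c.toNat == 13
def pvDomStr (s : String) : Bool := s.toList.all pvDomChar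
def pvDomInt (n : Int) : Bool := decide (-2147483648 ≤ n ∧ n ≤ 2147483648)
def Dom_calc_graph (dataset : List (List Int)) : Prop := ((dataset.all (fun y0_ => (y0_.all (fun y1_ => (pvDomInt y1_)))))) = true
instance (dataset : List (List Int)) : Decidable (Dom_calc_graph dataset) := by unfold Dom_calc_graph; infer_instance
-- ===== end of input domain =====

set_option maxRecDepth 4000


-- B replaces A's single fused accumulator loop by a divide-and-conquer scan for the
-- first two series and derives the third by elementwise addition (linearity of
-- prefix sums) — an alternative algorithm of similar cost.

-- ===== PORT A =====
-- one loop over range(len(dataset[0])), three running totals and three output lists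
def calc_graph (dataset : List (List Int)) : List (List Int) :=
  let row0 := dataset.getD 0 []
  let row1 := dataset.getD 1 []
  let st := (PySem.List.pyRange 0 (row0.length : Int) 1).foldl
    (fun (s : (Int × List Int) × (Int × List Int) × (Int × List Int)) i =>
      let a := PySem.List.pyGetD row0 i 0
      let b := PySem.List.pyGetD row1 i 0
      ((s.1.1 + a, s.1.2 ++ [s.1.1 + a]),
       (s.2.1.1 + b, s.2.1.2 ++ [s.2.1.1 + b]),
       (s.2.2.1 + (a + b), s.2.2.2 ++ [s.2.2.1 + (a + b)])))
    ((0, []), (0, []), (0, []))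
  [st.1.2, st.2.1.2, st.2.2.2]

-- ===== PORT B =====
-- divide-and-conquer scan: prefix(xs) = prefix(left) ++ (sum(left) + each of prefix(right));
-- 'left[-1]' is ported with pyGetD …, (-1) (left is nonempty whenever it is read)
def pvPrefixSums (xs : List Int) : List Int :=
  if _h : xs.length ≤ 1 then xs
  else
    let mid := xs.length / 2
    let left := pvPrefixSums (xs.take mid)
    let right := pvPrefixSums (xs.drop mid)
    let off := PySem.List.pyGetD left (-1) 0
    left ++ right.map (fun v => off + v)
termination_by xs.length
decreasing_by
  · simp only [List.length_take]; omega
  · simp only [List.length_drop]; omega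

def calc_graph_alt (dataset : List (List Int)) : List (List Int) :=
  let col0 := dataset.getD 0 []
  let col1 := (PySem.List.pyRange 0 (col0.length : Int) 1).map
      (fun i => PySem.List.pyGetD (dataset.getD 1 []) i 0)
  let red := pvPrefixSums col0
  let blue := pvPrefixSums col1
  let cyan := List.zipWith (· + ·) red blue
  [red, blue, cyan]

-- ===== PRECONDITION & SPEC =====
-- Pre_ excludes exactly the inputs where A raises IndexError: an empty dataset,
-- or a nonempty first row without a second row at least as long.
def Pre_calc_graph (dataset : List (List Int)) : Prop :=
  1 ≤ dataset.length ∧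
    ((dataset.getD 0 []).length = 0 ∨
      (2 ≤ dataset.length ∧ (dataset.getD 0 []).length ≤ (dataset.getD 1 []).length))
instance (dataset : List (List Int)) : Decidable (Pre_calc_graph dataset) := by
  unfold Pre_calc_graph; infer_instance

def pvWitness_calc_graph : List (List Int) := [[1, 2, 3], [4, 5, 6]]

def Spec_calc_graph (dataset : List (List Int)) (out : List (List Int)) : Prop := out = calc_graph_alt dataset
instance (dataset : List (List Int)) (out : List (List Int)) : Decidable (Spec_calc_graph dataset out) := by unfold Spec_calc_graph; infer_instance

-- ===== CLAIM (what is proved, stated in full; the proofs are below) =====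
def Claim_equal_calc_graph : Prop := ∀ (dataset : List (List Int)), Dom_calc_graph dataset → Pre_calc_graph dataset → Spec_calc_graph dataset (calc_graph dataset)

-- ===== LEMMAS AND PROOFS =====

-- reference form of a running prefix sum, used only by the proofs
def pvAccumulate (acc : Int) : List Int → List Int
  | [] => []
  | x :: xs => (acc + x) :: pvAccumulate (acc + x) xs

theorem pvAccumulate_append_singleton (l : List Int) (x : Int) :
    ∀ acc, pvAccumulate acc (l ++ [x]) = pvAccumulate acc l ++ [acc + l.sum + x] := by
  induction l with
  | nil => intro acc; simp [pvAccumulate]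
  | cons y t ih =>
      intro acc
      simp only [List.cons_append, pvAccumulate, ih, List.sum_cons]
      ring_nf

theorem pvAccumulate_append (l1 l2 : List Int) :
    ∀ acc, pvAccumulate acc (l1 ++ l2) = pvAccumulate acc l1 ++ pvAccumulate (acc + l1.sum) l2 := by
  induction l1 with
  | nil => intro acc; simp [pvAccumulate]
  | cons y t ih =>
      intro acc
      simp only [List.cons_append, pvAccumulate, ih, List.sum_cons]
      ring_nf

theorem pvAccumulate_shift (l : List Int) :
    ∀ a d, (pvAccumulate a l).map (fun v => d + v) = pvAccumulate (d + a) l := by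
  induction l with
  | nil => intro a d; simp [pvAccumulate]
  | cons y t ih =>
      intro a d
      simp only [pvAccumulate, List.map_cons, ih]
      ring_nf

theorem pvAccumulate_getLast? (l : List Int) (h : l ≠ []) (a : Int) :
    (pvAccumulate a l).getLast? = some (a + l.sum) := by
  have hsum := congrArg List.sum (List.dropLast_append_getLast h)
  simp only [List.sum_append, List.sum_cons, List.sum_nil] at hsum
  conv_lhs => rw [← List.dropLast_append_getLast h, pvAccumulate_append_singleton]
  simp only [List.getLast?_append, List.getLast?_singleton, Option.some_or]
  rw [← hsum]
  ring_nf

theorem pvAccumulate_ne_nil (l : List Int) (h : l ≠ []) (a : Int) :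
    pvAccumulate a l ≠ [] := by
  obtain ⟨x, t, rfl⟩ := List.exists_cons_of_ne_nil h
  simp [pvAccumulate]

theorem pvAccumulate_zipWith (l1 : List Int) :
    ∀ l2 a b, l1.length = l2.length →
      List.zipWith (· + ·) (pvAccumulate a l1) (pvAccumulate b l2)
        = pvAccumulate (a + b) (List.zipWith (· + ·) l1 l2) := by
  induction l1 with
  | nil => intro l2 a b h; simp [pvAccumulate]
  | cons x t ih =>
      intro l2 a b h
      cases l2 with
      | nil => simp at h
      | cons y s =>
          simp only [List.zipWith_cons_cons, pvAccumulate]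
          rw [ih s (a + x) (b + y) (by simpa using h)]
          ring_nf

theorem pvPrefixSums_eq (xs : List Int) : pvPrefixSums xs = pvAccumulate 0 xs := by
  fun_induction pvPrefixSums xs with
  | case1 xs h =>
      match xs, h with
      | [], _ => simp [pvAccumulate]
      | [x], _ => simp [pvAccumulate]
  | case2 xs h mid left right off ih1 ih2 =>
      show pvPrefixSums (xs.take mid)
          ++ (pvPrefixSums (xs.drop mid)).map
              (fun v => PySem.List.pyGetD (pvPrefixSums (xs.take mid)) (-1) 0 + v)
        = pvAccumulate 0 xs
      have htne : xs.take mid ≠ [] := by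
        intro heq
        have := congrArg List.length heq
        simp only [List.length_take, List.length_nil, mid] at this
        omega
      rw [ih1, ih2]
      have hne := pvAccumulate_ne_nil _ htne 0
      rw [PySem.List.pyGetD_neg_one (h := hne)]
      have hlast : (pvAccumulate (0 : Int) (xs.take mid)).getLast hne
          = (xs.take mid).sum := by
        have h2 := pvAccumulate_getLast? _ htne 0
        rw [List.getLast?_eq_some_getLast hne, Option.some_inj] at h2
        simpa using h2
      rw [hlast, pvAccumulate_shift]
      rw [show (xs.take mid).sum + 0 = 0 + (xs.take mid).sum by ring]
      rw [← pvAccumulate_append, List.take_append_drop]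

theorem pv_map_pyGetD_take (ys : List Int) (n : Nat) (h : n ≤ ys.length) :
    (PySem.List.pyRange 0 (n : Int) 1).map (fun i => PySem.List.pyGetD ys i 0)
      = ys.take n := by
  induction n with
  | zero => simp [PySem.List.pyRange_one_eq_nil]
  | succ m ih =>
      rw [show ((m + 1 : Nat) : Int) = (m : Int) + 1 by push_cast; ring,
          PySem.List.pyRange_one_succ_right (by positivity)]
      rw [List.map_append, ih (by omega)]
      have hm : m < ys.length := by omega
      rw [List.take_add_one]
      simp [PySem.List.pyGetD_natCast, List.getD_eq_getElem?_getD,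
        List.getElem?_eq_getElem hm]

theorem pv_loop_inv (r0 r1 : List Int) (n : Nat) (h0 : n ≤ r0.length) (h1 : n ≤ r1.length) :
    (PySem.List.pyRange 0 (n : Int) 1).foldl
      (fun (s : (Int × List Int) × (Int × List Int) × (Int × List Int)) i =>
        let a := PySem.List.pyGetD r0 i 0
        let b := PySem.List.pyGetD r1 i 0
        ((s.1.1 + a, s.1.2 ++ [s.1.1 + a]),
         (s.2.1.1 + b, s.2.1.2 ++ [s.2.1.1 + b]),
         (s.2.2.1 + (a + b), s.2.2.2 ++ [s.2.2.1 + (a + b)])))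
      ((0, []), (0, []), (0, []))
    = (((r0.take n).sum, pvAccumulate 0 (r0.take n)),
       ((r1.take n).sum, pvAccumulate 0 (r1.take n)),
       ((List.zipWith (· + ·) (r0.take n) (r1.take n)).sum,
        pvAccumulate 0 (List.zipWith (· + ·) (r0.take n) (r1.take n)))) := by
  induction n with
  | zero => simp [PySem.List.pyRange_one_eq_nil, pvAccumulate]
  | succ m ih =>
      rw [show ((m + 1 : Nat) : Int) = (m : Int) + 1 by push_cast; ring,
          PySem.List.pyRange_one_succ_right (by positivity)]
      rw [List.foldl_append, ih (by omega) (by omega)]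
      have hm0 : m < r0.length := by omega
      have hm1 : m < r1.length := by omega
      have g0 : PySem.List.pyGetD r0 (m : Int) 0 = r0[m] := by
        simp [PySem.List.pyGetD_natCast, List.getD_eq_getElem?_getD,
          List.getElem?_eq_getElem hm0]
      have g1 : PySem.List.pyGetD r1 (m : Int) 0 = r1[m] := by
        simp [PySem.List.pyGetD_natCast, List.getD_eq_getElem?_getD,
          List.getElem?_eq_getElem hm1]
      have t0 : r0.take (m + 1) = r0.take m ++ [r0[m]] := by
        rw [List.take_add_one]; simp [List.getElem?_eq_getElem hm0]
      have t1 : r1.take (m + 1) = r1.take m ++ [r1[m]] := by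
        rw [List.take_add_one]; simp [List.getElem?_eq_getElem hm1]
      simp only [List.foldl_cons, List.foldl_nil, g0, g1, t0, t1]
      rw [show List.zipWith (· + ·) (r0.take m ++ [r0[m]]) (r1.take m ++ [r1[m]])
            = List.zipWith (· + ·) (r0.take m) (r1.take m) ++ [r0[m] + r1[m]] from by
          rw [List.zipWith_append (by simp [hm0.le, hm1.le])]; simp]
      simp only [pvAccumulate_append_singleton, List.sum_append, List.sum_cons, List.sum_nil]
      ring_nf

-- ===== VERDICT (by name: the statement is the Claim_ definition above) =====
theorem calc_graph_spec : Claim_equal_calc_graph := by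
  intro dataset _ hpre
  obtain ⟨hlen, hcase⟩ := hpre
  unfold Spec_calc_graph
  simp only [calc_graph, calc_graph_alt]
  set r0 := dataset.getD 0 [] with hr0
  set r1 := dataset.getD 1 [] with hr1
  rcases hcase with h0 | ⟨_, hle⟩
  · have : r0 = [] := List.eq_nil_of_length_eq_zero h0
    simp [this, PySem.List.pyRange_one_eq_nil, pvPrefixSums]
  · rw [pv_loop_inv r0 r1 r0.length le_rfl hle,
        pv_map_pyGetD_take r1 r0.length hle]
    rw [pvPrefixSums_eq, pvPrefixSums_eq]
    rw [pvAccumulate_zipWith r0 (r1.take r0.length) 0 0 (by simp [hle])]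
    simp
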